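-- pv_equiv track=rewrite | github.com/Danlemann/BSUIR | 4_sem/3lb/method_c_t.py | lab_k_datalable
-- ===== SOURCE A (Python) =====
-- def lab_k_datalable(element_input_const: list, element_in_datata_input_with_part: str):
--
--     rezultation_input_formula = list()
--
--     if element_in_datata_input_with_part[0] == '(' and element_in_datata_input_with_part[-1] == ')':
--         element_in_datata_input_with_part = element_in_datata_input_with_part[1:-1]
--
--     for iterator_to_move in range(len(element_input_const)):
--         key_element_c = 0
--         lab_k_for(element_in_datata_input_with_part, element_input_const, iterator_to_move, key_element_c,
--                   rezultation_input_formula)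
--
--     return rezultation_input_formula
--
-- def lab_k_for(element_in_datata_input_with_part, element_input_const, iterator_to_move, key_element_c,
--               rezultation_input_formula):
--     for iterator in range(len(element_in_datata_input_with_part.split('+'))):
--         if not element_in_datata_input_with_part.split('+')[iterator] in \
--                element_input_const[iterator_to_move][1:-1].split('+'):
--             rezultation_input_formula.append('')
--             break
--         else:
--             key_element_c += 1
--     if key_element_c == len(element_in_datata_input_with_part.split('+')):
--         rezultation_input_formula.append('X')
-- ===== SOURCE B (Python) =====
-- def lab_k_datalable(element_input_const: list, element_in_datata_input_with_part: str):
--     s = element_in_datata_input_with_part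
--     if s[0] == '(' and s[-1] == ')':
--         s = s[1:-1]
--     parts = s.split('+')
--     n = len(element_input_const)
--     surviving = set(range(n))
--     for part in parts:
--         surviving &= {i for i in range(n)
--                       if part in element_input_const[i][1:-1].split('+')}
--     return ['X' if i in surviving else '' for i in range(n)]
-- ===== Notes on version B (the rewrite author's own statement) =====
-- stated objective: faster
-- what changed: Splits the formula once and intersects per-part index sets (an inverted-index narrowing over set intersections) instead of re-splitting the formula string on every inner iteration of a per-element membership loop with a counter and break.
import Mathlib
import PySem

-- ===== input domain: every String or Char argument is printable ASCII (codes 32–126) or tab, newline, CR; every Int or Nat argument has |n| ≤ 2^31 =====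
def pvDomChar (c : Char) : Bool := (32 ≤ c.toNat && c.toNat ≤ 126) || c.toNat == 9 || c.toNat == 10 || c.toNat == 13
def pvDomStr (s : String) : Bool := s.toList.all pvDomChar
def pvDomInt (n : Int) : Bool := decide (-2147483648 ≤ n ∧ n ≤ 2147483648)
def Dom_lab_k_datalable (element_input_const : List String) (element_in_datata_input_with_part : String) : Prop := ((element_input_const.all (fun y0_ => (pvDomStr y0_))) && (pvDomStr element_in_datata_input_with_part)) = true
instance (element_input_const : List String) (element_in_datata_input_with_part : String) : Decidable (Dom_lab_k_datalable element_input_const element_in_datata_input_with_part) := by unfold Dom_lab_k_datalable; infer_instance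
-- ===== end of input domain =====

-- B replaces A's per-element counter loop (which re-splits the formula string on every
-- iteration) by one split of the formula plus an intersection of per-part index sets.

-- ===== PORT A =====
-- 'if s[0] == "(" and s[-1] == ")": s = s[1:-1]' — shared by both Pythons, kept as a helper
def pvStripParens (s : String) : String :=
  match PySem.Str.pyGet? s 0, PySem.Str.pyGet? s (-1) with
  | some a, some b =>
      if a == '(' && b == ')' then PySem.Str.slice s (some 1) (some (-1)) else s
  | _, _ => s

-- the inner 'for iterator in range(len(parts))' of lab_k_for, with the counter and break
def lab_k_for_loop (parts : List String) (cparts : List String) (key : Int) (total : Int)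
    (res : List String) : List String :=
  match parts with
  | [] => if key == total then res ++ ["X"] else res
  | p :: rest =>
      if !(cparts.contains p) then res ++ [""]
      else lab_k_for_loop rest cparts (key + 1) total res

def lab_k_for (element_in_datata_input_with_part : String) (element_input_const : List String)
    (iterator_to_move : Int) (key_element_c : Int) (rezultation_input_formula : List String) :
    List String :=
  let parts := (PySem.Str.split? element_in_datata_input_with_part "+").getD []
  let cparts := (PySem.Str.split?
      (PySem.Str.slice (PySem.List.pyGetD element_input_const iterator_to_move "")
        (some 1) (some (-1))) "+").getD []
  lab_k_for_loop parts cparts key_element_c (PySem.List.len parts) rezultation_input_formula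

def lab_k_datalable (element_input_const : List String) (element_in_datata_input_with_part : String) : List String :=
  let s := pvStripParens element_in_datata_input_with_part
  (PySem.List.pyRange 0 (PySem.List.len element_input_const) 1).foldl
    (fun res it => lab_k_for s element_input_const it 0 res) []

-- ===== PORT B =====
def lab_k_datalable_alt (element_input_const : List String) (element_in_datata_input_with_part : String) : List String :=
  let s := pvStripParens element_in_datata_input_with_part
  let parts := (PySem.Str.split? s "+").getD []
  let n := PySem.List.len element_input_const
  let surviving := parts.foldl
    (fun surv part => PySem.Set.inter surv
      (PySem.Set.ofList ((PySem.List.pyRange 0 n 1).filter (fun i =>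
        ((PySem.Str.split?
            (PySem.Str.slice (PySem.List.pyGetD element_input_const i "") (some 1) (some (-1)))
            "+").getD []).contains part))))
    (PySem.Set.ofList (PySem.List.pyRange 0 n 1))
  (PySem.List.pyRange 0 n 1).map (fun i => if surviving.contains i then "X" else "")

-- ===== PRECONDITION & SPEC =====
-- Pre_ excludes only the empty formula string, on which A raises IndexError at s[0] (B raises too).
def Pre_lab_k_datalable (element_input_const : List String) (element_in_datata_input_with_part : String) : Prop :=
  element_in_datata_input_with_part ≠ ""
instance (element_input_const : List String) (element_in_datata_input_with_part : String) : Decidable (Pre_lab_k_datalable element_input_const element_in_datata_input_with_part) := by unfold Pre_lab_k_datalable; infer_instance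

def pvWitness_lab_k_datalable : List String × String := (["(a+b)", "(b)"], "(a+b)")

def Spec_lab_k_datalable (element_input_const : List String) (element_in_datata_input_with_part : String) (out : List String) : Prop := out = lab_k_datalable_alt element_input_const element_in_datata_input_with_part
instance (element_input_const : List String) (element_in_datata_input_with_part : String) (out : List String) : Decidable (Spec_lab_k_datalable element_input_const element_in_datata_input_with_part out) := by unfold Spec_lab_k_datalable; infer_instance

-- ===== CLAIM (what is proved, stated in full; the proofs are below) =====
def Claim_equal_lab_k_datalable : Prop := ∀ (element_input_const : List String) (element_in_datata_input_with_part : String), Dom_lab_k_datalable element_input_const element_in_datata_input_with_part → Pre_lab_k_datalable element_input_const element_in_datata_input_with_part → Spec_lab_k_datalable element_input_const element_in_datata_input_with_part (lab_k_datalable element_input_const element_in_datata_input_with_part)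

-- ===== LEMMAS AND PROOFS =====

-- the per-element verdict both programs agree on
def pvMark (parts : List String) (c : String) : String :=
  if parts.all (fun p =>
      ((PySem.Str.split? (PySem.Str.slice c (some 1) (some (-1))) "+").getD []).contains p)
  then "X" else ""

theorem lab_k_for_loop_eq (parts cparts : List String) (key total : Int)
    (res : List String) (h : total = key + parts.length) :
    lab_k_for_loop parts cparts key total res =
      res ++ [if parts.all (fun p => cparts.contains p) then "X" else ""] := by
  induction parts generalizing key res with
  | nil => simp [lab_k_for_loop, h]
  | cons p rest ih =>
      simp only [lab_k_for_loop]
      cases hc : cparts.contains p with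
      | false =>
          rw [if_pos (by decide)]
          rw [List.all_cons, hc]
          simp
      | true =>
          rw [if_neg (by decide),
            ih (key + 1) res (by simp only [List.length_cons] at h; push_cast at h ⊢; omega)]
          simp only [List.all_cons, hc, Bool.true_and]

theorem lab_k_for_eq (s : String) (consts : List String) (it : Int) (res : List String) :
    lab_k_for s consts it 0 res =
      res ++ [pvMark ((PySem.Str.split? s "+").getD []) (PySem.List.pyGetD consts it "")] := by
  unfold lab_k_for pvMark
  rw [lab_k_for_loop_eq _ _ 0 _ _ (by simp)]

theorem lab_k_datalable_eq_map (consts : List String) (s0 : String) :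
    lab_k_datalable consts s0 =
      consts.map (pvMark ((PySem.Str.split? (pvStripParens s0) "+").getD [])) := by
  unfold lab_k_datalable
  simp only [lab_k_for_eq, PySem.List.len_eq]
  rw [PySem.List.foldl_pyRange_zero_pyGetD' consts ""
      (fun acc c => acc ++ [pvMark ((PySem.Str.split? (pvStripParens s0) "+").getD []) c]) []]
  exact PySem.List.foldl_append_singleton_eq_map _ _ _

theorem surviving_contains (parts : List String) (q : String → List Int)
    (init : PySem.Set Int) (x : Int) :
    (x ∈ parts.foldl (fun surv part => PySem.Set.inter surv (PySem.Set.ofList (q part))) init)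
      ↔ x ∈ init ∧ ∀ p ∈ parts, x ∈ q p := by
  induction parts generalizing init with
  | nil => simp
  | cons p rest ih =>
      simp only [List.foldl_cons, ih, PySem.Set.mem_inter, PySem.Set.mem_ofList,
        List.mem_cons]
      aesop

theorem surviving_contains_bool (parts : List String) (q : String → List Int)
    (init : PySem.Set Int) (x : Int) :
    (parts.foldl (fun surv part => PySem.Set.inter surv (PySem.Set.ofList (q part))) init).contains x
      = (init.contains x && parts.all (fun p => (q p).contains x)) := by
  rw [Bool.eq_iff_iff]
  simp only [PySem.Set.contains_iff, surviving_contains, Bool.and_eq_true, List.all_eq_true,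
    List.contains_iff_mem]

theorem lab_k_datalable_alt_eq_map (consts : List String) (s0 : String) :
    lab_k_datalable_alt consts s0 =
      consts.map (pvMark ((PySem.Str.split? (pvStripParens s0) "+").getD [])) := by
  unfold lab_k_datalable_alt
  simp only [PySem.List.len_eq]
  apply List.ext_getElem
  · simp [PySem.List.length_pyRange_one]
  · intro k hk hk'
    have hkc : k < consts.length := by
      simpa [PySem.List.length_pyRange_one] using hk
    have hinrange : (k : Int) ∈ PySem.List.pyRange 0 ((consts.length : Int)) 1 := by
      rw [PySem.List.mem_pyRange_one]
      exact ⟨Int.natCast_nonneg k, by exact_mod_cast hkc⟩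
    have h1 : (PySem.Set.ofList (PySem.List.pyRange 0 ((consts.length : Int)) 1)).contains ((k : Int)) = true := by
      rw [PySem.Set.contains_iff, PySem.Set.mem_ofList]
      exact hinrange
    have h2 : ∀ f : Int → Bool,
        ((PySem.List.pyRange 0 ((consts.length : Int)) 1).filter f).contains ((k : Int)) = f (k : Int) := by
      intro f
      rw [Bool.eq_iff_iff]
      simp [List.mem_filter, hinrange]
    have hget : PySem.List.pyGetD consts ((k : Int)) "" = consts[k] := by
      rw [PySem.List.pyGetD_natCast]
      exact List.getD_eq_getElem _ _ hkc
    simp only [List.getElem_map, PySem.List.getElem_pyRange_one, zero_add,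
      surviving_contains_bool, h1, h2, hget, Bool.true_and]
    rfl

-- ===== VERDICT (by name: the statement is the Claim_ definition above) =====
theorem lab_k_datalable_spec : Claim_equal_lab_k_datalable := by
  intro consts s0 _ _
  unfold Spec_lab_k_datalable
  rw [lab_k_datalable_eq_map, lab_k_datalable_alt_eq_map]
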